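-- pv_equiv track=rewrite | github.com/pirl-unc/vmwhere | src/pipeline.py | count_max_consecutive_motifs
-- ===== SOURCE A (Python) =====
-- def count_max_consecutive_motifs(sequence, motif):
--     """
--     Counts the number of consecutive occurrences of a motif in a given sequence.
--
--     Parameters:
--         sequence (str): The sequence to search within.
--         motif (str): The motif to look for.
--
--     Returns:
--         int: The number of consecutive motif occurrences, or 0 if the motif is not found.
--     """
--
--     max_sequence_repeats = 0
--     start_index = 0
--
--     while start_index < len(sequence):
--         # find starting index of motif
--         start_index = sequence.find(motif, start_index)
--         if start_index == -1:
--             break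
--
--         # count consecutive occurrences from this position
--         motif_count_consecutive = 1
--         while sequence[start_index + len(motif)*motif_count_consecutive : start_index + len(motif) * (motif_count_consecutive + 1)] == motif:
--             motif_count_consecutive += 1
--
--         # update maximum repeats
--         max_sequence_repeats = max(max_sequence_repeats, motif_count_consecutive) # compare current motif repeat to previously found motif repeat, retain larger value
--         start_index += len(motif)*motif_count_consecutive  # move to end of motif to keep searching sequenceuntil you reach the end of the sequence
--
--     return max_sequence_repeats
-- ===== SOURCE B (Python) =====
-- def count_max_consecutive_motifs(sequence, motif):
--     # Phase 1: gather all non-overlapping motif start positions left to right.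
--     positions = []
--     start = 0
--     while True:
--         i = sequence.find(motif, start)
--         if i == -1:
--             break
--         positions.append(i)
--         start = i + len(motif)
--     # Phase 2: longest run of consecutive (gap-free) positions.
--     best = 0
--     streak = 0
--     prev = None
--     for p in positions:
--         if prev is not None and p == prev + len(motif):
--             streak += 1
--         else:
--             streak = 1
--         prev = p
--         best = max(best, streak)
--     return best
-- ===== Notes on version B (the rewrite author's own statement) =====
-- stated objective: alternative
-- what changed: A interleaves find with an inner slice-comparison loop that counts a run in place; B first gathers all non-overlapping motif start positions with find, then does a separate longest-consecutive-run scan over that position list.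
-- outside the precondition, e.g. on count_max_consecutive_motifs('', ''): A returns 0, B does not finish within the time limit
import Mathlib
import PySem

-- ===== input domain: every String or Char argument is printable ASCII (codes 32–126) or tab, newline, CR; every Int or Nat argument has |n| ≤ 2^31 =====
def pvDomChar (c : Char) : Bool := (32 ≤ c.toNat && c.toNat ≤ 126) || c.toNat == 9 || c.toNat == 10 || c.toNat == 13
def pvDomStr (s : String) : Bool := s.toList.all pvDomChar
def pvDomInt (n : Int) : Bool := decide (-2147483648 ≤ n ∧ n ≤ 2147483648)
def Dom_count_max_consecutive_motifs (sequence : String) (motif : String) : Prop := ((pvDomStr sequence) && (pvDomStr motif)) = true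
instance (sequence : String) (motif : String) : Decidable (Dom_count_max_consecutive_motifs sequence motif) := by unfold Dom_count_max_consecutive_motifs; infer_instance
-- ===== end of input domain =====

-- B replaces A's interleaved find + in-place run counting by a gather-positions phase
-- followed by a longest-consecutive-run scan (objective: alternative decomposition).

-- ===== PORT A =====
-- inner 'while sequence[start+len(motif)*c : start+len(motif)*(c+1)] == motif: c += 1'
-- (fuel only makes the loop total; with a nonempty motif it is never exhausted)
def pvAInner (s m : List Char) (i : Int) : Nat → Int → Int
  | 0, c => c
  | fuel+1, c =>
    if PySem.List.slice s (some (i + PySem.List.len m * c)) (some (i + PySem.List.len m * (c+1))) = m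
    then pvAInner s m i fuel (c+1) else c

-- outer 'while start_index < len(sequence): …' (fuel likewise only for totality)
def pvAOuter (s m : List Char) : Nat → Int → Int → Int
  | 0, _, best => best
  | fuel+1, start, best =>
    if start < PySem.List.len s then
      let i := PySem.Chars.findFrom s m start none
      if i = -1 then best
      else
        let c := pvAInner s m i (s.length + 1) 1
        pvAOuter s m fuel (i + PySem.List.len m * c) (max best c)
    else best

def count_max_consecutive_motifs (sequence : String) (motif : String) : Int :=
  pvAOuter sequence.toList motif.toList (sequence.toList.length + 1) 0 0

-- ===== PORT B =====
-- phase 1: 'while True: i = sequence.find(motif, start); if i == -1: break; positions.append(i); start = i + len(motif)'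
def pvBGather (s m : List Char) : Nat → Int → List Int → List Int
  | 0, _, acc => acc
  | fuel+1, start, acc =>
    let i := PySem.Chars.findFrom s m start none
    if i = -1 then acc else pvBGather s m fuel (i + PySem.List.len m) (acc ++ [i])

-- phase 2 loop body: state (best, streak, prev)
def pvBStep (mlen : Int) (st : Int × Int × Option Int) (p : Int) : Int × Int × Option Int :=
  let streak : Int :=
    match st.2.2 with
    | some prev => if p = prev + mlen then st.2.1 + 1 else 1
    | none => 1
  (max st.1 streak, streak, some p)

def count_max_consecutive_motifs_alt (sequence : String) (motif : String) : Int :=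
  let s := sequence.toList
  let m := motif.toList
  let positions := pvBGather s m (s.length + 1) 0 []
  (positions.foldl (pvBStep (PySem.List.len m)) (0, 0, none)).1

-- ===== PRECONDITION & SPEC =====
-- Pre_ excludes the empty motif, on which A loops forever for every nonempty sequence
-- (find keeps returning start_index) and only the degenerate empty sequence returns 0,
-- while B's gather loop likewise never terminates there.
def Pre_count_max_consecutive_motifs (sequence : String) (motif : String) : Prop := motif ≠ ""
instance (sequence : String) (motif : String) : Decidable (Pre_count_max_consecutive_motifs sequence motif) := by unfold Pre_count_max_consecutive_motifs; infer_instance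

def pvWitness_count_max_consecutive_motifs : String × String := ("abcabcab", "abc")

def Spec_count_max_consecutive_motifs (sequence : String) (motif : String) (out : Int) : Prop := out = count_max_consecutive_motifs_alt sequence motif
instance (sequence : String) (motif : String) (out : Int) : Decidable (Spec_count_max_consecutive_motifs sequence motif out) := by unfold Spec_count_max_consecutive_motifs; infer_instance

-- ===== CLAIM (what is proved, stated in full; the proofs are below) =====
def Claim_equal_count_max_consecutive_motifs : Prop := ∀ (sequence : String) (motif : String), Dom_count_max_consecutive_motifs sequence motif → Pre_count_max_consecutive_motifs sequence motif → Spec_count_max_consecutive_motifs sequence motif (count_max_consecutive_motifs sequence motif)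

-- ===== LEMMAS AND PROOFS =====

-- gather without the accumulator
def pvGatherS (s m : List Char) : Nat → Int → List Int
  | 0, _ => []
  | fuel+1, start =>
    let i := PySem.Chars.findFrom s m start none
    if i = -1 then [] else i :: pvGatherS s m fuel (i + PySem.List.len m)

-- the arithmetic run i, i+mlen, …, i+mlen*(c-1)
def pvRun (a mlen : Int) (c : Nat) : List Int := (List.range c).map (fun k : Nat => a + mlen * (k : Int))

theorem pvBGather_acc (s m : List Char) (fuel : Nat) :
    ∀ (start : Int) (acc : List Int),
    pvBGather s m fuel start acc = acc ++ pvGatherS s m fuel start := by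
  induction fuel with
  | zero => intro start acc; simp [pvBGather, pvGatherS]
  | succ f ih =>
    intro start acc
    simp only [pvBGather, pvGatherS]
    split
    · simp
    · rw [ih]; simp

-- a Python slice of motif length equals the motif iff the motif is a prefix at that index
theorem pvSlice_eq_iff (s m : List Char) (a : Int) (ha : 0 ≤ a) :
    PySem.List.slice s (some a) (some (a + (m.length : Int))) = m ↔ m <+: s.drop a.toNat := by
  obtain ⟨n, rfl⟩ : ∃ n : Nat, a = (n : Int) := ⟨a.toNat, by omega⟩
  rw [PySem.List.slice_natCast_add]
  rw [List.prefix_iff_eq_take]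
  simp [eq_comm]

-- a nonempty motif never matches at or past the end
theorem pvNoDrop (s m : List Char) (hm : m ≠ []) (a : Int) (ha : (s.length : Int) ≤ a) :
    ¬ m <+: s.drop a.toNat := by
  intro h
  have : s.drop a.toNat = [] := List.drop_eq_nil_of_le (by omega)
  rw [this] at h
  exact hm (List.prefix_nil.mp h)

-- a match at index a needs room: a + len(m) ≤ len(s)
theorem pvMatch_room (s m : List Char) (hm : m ≠ []) (a : Int) (h0 : 0 ≤ a)
    (hpre : m <+: s.drop a.toNat) :
    a + (m.length : Int) ≤ (s.length : Int) := by
  have h1 := hpre.length_le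
  have h2 : 0 < m.length := List.length_pos_iff.mpr hm
  simp [List.length_drop] at h1
  omega

-- find at the end of the string fails for a nonempty motif
theorem pvFind_at_end (s m : List Char) (hm : m ≠ []) (start : Int)
    (h1 : (s.length : Int) ≤ start) (h2 : start ≤ (s.length : Int)) :
    PySem.Chars.findFrom s m start none = -1 := by
  have hs : start = (s.length : Int) := le_antisymm h2 h1
  subst hs
  rw [PySem.Chars.findFrom_natCast s m s.length (le_refl _)]
  have h3 : PySem.Chars.find ([] : List Char) m = -1 := by
    rw [PySem.Chars.find_eq_neg_one_iff]
    simp [hm]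
  simp [List.drop_length, h3]

-- find returns its start position when the motif matches right there
theorem pvFind_at_match (s m : List Char) (hm : m ≠ []) (start : Int) (h0 : 0 ≤ start)
    (hpre : m <+: s.drop start.toNat) :
    PySem.Chars.findFrom s m start none = start := by
  obtain ⟨k, rfl⟩ : ∃ k : Nat, start = (k : Int) := ⟨start.toNat, by omega⟩
  simp only [Int.toNat_natCast] at hpre
  have hk : k ≤ s.length := by
    have := pvMatch_room s m hm k (by omega) (by simpa using hpre)
    have h2 : 0 < m.length := List.length_pos_iff.mpr hm
    omega
  rw [PySem.Chars.findFrom_natCast s m k hk]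
  have hfind : PySem.Chars.find (s.drop k) m = 0 := by
    have hinf : m <:+: s.drop k := hpre.isInfix
    have hnn : 0 ≤ PySem.Chars.find (s.drop k) m := (PySem.Chars.find_nonneg_iff _ _).mpr hinf
    have hspec := PySem.Chars.find_spec (s := s.drop k) (sub := m) hnn
    by_contra hne
    have hpos : 0 < (PySem.Chars.find (s.drop k) m).toNat := by omega
    exact hspec.2 0 hpos (by simpa using hpre)
  rw [hfind]
  simp

-- characterisation of A's inner counting loop
theorem pvAInner_spec (s m : List Char) (hm : m ≠ []) (i : Int) (hi : 0 ≤ i) :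
    ∀ (fuel : Nat) (c : Int), 1 ≤ c → (s.length : Int) < c + fuel →
    c ≤ pvAInner s m i fuel c ∧
    (∀ k, c ≤ k → k < pvAInner s m i fuel c → m <+: s.drop (i + (m.length : Int) * k).toNat) ∧
    ¬ m <+: s.drop (i + (m.length : Int) * pvAInner s m i fuel c).toNat := by
  have hM : 1 ≤ (m.length : Int) := by
    have := List.length_pos_iff.mpr hm; omega
  intro fuel
  induction fuel with
  | zero =>
    intro c hc hfuel
    simp only [pvAInner]
    refine ⟨le_refl _, fun k h1 h2 => absurd h1 (by omega), ?_⟩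
    apply pvNoDrop s m hm
    push_cast at hfuel
    nlinarith
  | succ f ih =>
    intro c hc hfuel
    simp only [pvAInner, PySem.List.len_eq]
    have hbound : i + (m.length : Int) * (c + 1) = (i + (m.length : Int) * c) + (m.length : Int) := by ring
    simp only [hbound]
    by_cases hcond : PySem.List.slice s (some (i + (m.length : Int) * c)) (some ((i + (m.length : Int) * c) + (m.length : Int))) = m
    · rw [if_pos hcond]
      have hpre : m <+: s.drop (i + (m.length : Int) * c).toNat :=
        (pvSlice_eq_iff s m _ (by nlinarith)).mp hcond
      have hih := ih (c + 1) (by omega) (by push_cast at hfuel ⊢; omega)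
      refine ⟨by omega, ?_, hih.2.2⟩
      intro k h1 h2
      rcases eq_or_lt_of_le h1 with h | h
      · exact h ▸ hpre
      · exact hih.2.1 k (by omega) h2
    · rw [if_neg hcond]
      exact ⟨le_refl _, fun k h1 h2 => absurd h1 (by omega),
        fun h => hcond ((pvSlice_eq_iff s m _ (by nlinarith)).mpr h)⟩

-- pvRun peels from the front
theorem pvRun_succ (a mlen : Int) (c : Nat) :
    pvRun a mlen (c+1) = a :: pvRun (a + mlen) mlen c := by
  unfold pvRun
  rw [List.range_succ_eq_map]
  simp only [List.map_cons, List.map_map, Nat.cast_zero, mul_zero, add_zero]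
  congr 1
  apply List.map_congr_left
  intro k _
  simp only [Function.comp_apply]
  push_cast
  ring

-- peeling one matched position off the gather
theorem pvGatherS_cons (s m : List Char) (hm : m ≠ []) (fuel : Nat) (a : Int) (h0 : 0 ≤ a)
    (hpre : m <+: s.drop a.toNat) :
    pvGatherS s m (fuel+1) a = a :: pvGatherS s m fuel (a + (m.length : Int)) := by
  have hfind := pvFind_at_match s m hm a h0 hpre
  simp only [pvGatherS, hfind, PySem.List.len_eq]
  rw [if_neg (by omega)]

-- peeling a whole run of c consecutive matches off the gather
theorem pvGatherS_run (s m : List Char) (hm : m ≠ []) :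
    ∀ (c : Nat) (fuel : Nat) (a : Int), 0 ≤ a → c ≤ fuel →
    (∀ k : Int, 0 ≤ k → k < (c : Int) → m <+: s.drop (a + (m.length : Int) * k).toNat) →
    pvGatherS s m fuel a =
      pvRun a (m.length : Int) c ++ pvGatherS s m (fuel - c) (a + (m.length : Int) * (c : Int)) := by
  intro c
  induction c with
  | zero => intro fuel a h0 hcf hmat; simp [pvRun]
  | succ cc ih =>
    intro fuel a h0 hcf hmat
    obtain ⟨f, rfl⟩ : ∃ f, fuel = f + 1 := ⟨fuel - 1, by omega⟩
    have hpre0 : m <+: s.drop a.toNat := by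
      have := hmat 0 le_rfl (by push_cast; omega)
      simpa using this
    rw [pvGatherS_cons s m hm f a h0 hpre0, pvRun_succ]
    have hshift : ∀ k : Int, 0 ≤ k → k < (cc : Int) →
        m <+: s.drop ((a + (m.length : Int)) + (m.length : Int) * k).toNat := by
      intro k hk0 hkc
      have harg : (a + (m.length : Int)) + (m.length : Int) * k
          = a + (m.length : Int) * (k + 1) := by ring
      rw [harg]
      exact hmat (k+1) (by omega) (by push_cast; omega)
    rw [ih f (a + (m.length : Int)) (by
          have := List.length_pos_iff.mpr hm; omega) (by omega) hshift]
    have harith : (a + (m.length : Int)) + (m.length : Int) * (cc : Int)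
        = a + (m.length : Int) * ((cc : Nat) + 1 : Nat) := by push_cast; ring
    rw [harith]
    simp [Nat.succ_sub_succ]

-- folding B's scan over a fully chained run
theorem pvFold_run_chain (mlen : Int) :
    ∀ (c : Nat) (b st p : Int), st ≤ b →
    List.foldl (pvBStep mlen) (b, st, some p) (pvRun (p + mlen) mlen c) =
      (max b (st + (c : Int)), st + (c : Int), some (p + mlen * (c : Int))) := by
  intro c
  induction c with
  | zero =>
    intro b st p h
    simp [pvRun, max_eq_left h]
  | succ cc ih =>
    intro b st p h
    rw [pvRun_succ]
    simp only [List.foldl_cons]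
    have hstep : pvBStep mlen (b, st, some p) (p + mlen)
        = (max b (st+1), st+1, some (p+mlen)) := by
      simp [pvBStep]
    rw [hstep, ih (max b (st+1)) (st+1) (p+mlen) (le_max_right _ _)]
    refine Prod.ext ?_ (Prod.ext ?_ ?_)
    · show max (max b (st+1)) (st + 1 + (cc : Int)) = max b (st + ((cc : Nat) + 1 : Nat))
      push_cast; omega
    · show st + 1 + (cc : Int) = st + ((cc : Nat) + 1 : Nat)
      push_cast; ring
    · show some (p + mlen + mlen * (cc : Int)) = some (p + mlen * ((cc : Nat) + 1 : Nat))
      push_cast; ring_nf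

-- main loop correspondence: A's outer loop = B's scan over the gathered positions
theorem pvMain (s m : List Char) (hm : m ≠ []) :
    ∀ (fuelA : Nat) (fuelG : Nat) (start best streak : Int) (prev : Option Int),
    0 ≤ start → start ≤ (s.length : Int) →
    (s.length : Int) < start + fuelA → (s.length : Int) < start + fuelG →
    streak ≤ best →
    (∀ p, prev = some p → PySem.Chars.findFrom s m start none ≠ p + (m.length : Int)) →
    pvAOuter s m fuelA start best =
      (List.foldl (pvBStep (m.length : Int)) (best, streak, prev) (pvGatherS s m fuelG start)).1 := by
  have hM : 1 ≤ (m.length : Int) := by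
    have := List.length_pos_iff.mpr hm; omega
  intro fuelA
  induction fuelA with
  | zero => intro fuelG start best streak prev h0 h1 h2 h3 h4 h5; push_cast at h2; omega
  | succ fA ih =>
    intro fuelG start best streak prev h0 h1 h2 h3 h4 h5
    obtain ⟨fG, rfl⟩ : ∃ fG, fuelG = fG + 1 := by
      cases fuelG with
      | zero => exfalso; push_cast at h3; omega
      | succ n => exact ⟨n, rfl⟩
    by_cases hlt : start < (s.length : Int)
    case neg =>
      have hfind := pvFind_at_end s m hm start (by omega) h1
      simp only [pvAOuter, pvGatherS, PySem.List.len_eq, hfind, if_neg hlt]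
      simp
    case pos =>
      by_cases hneg : PySem.Chars.findFrom s m start none = -1
      · simp only [pvAOuter, pvGatherS, PySem.List.len_eq, if_pos hlt, hneg]
        simp
      · obtain ⟨k, rfl⟩ : ∃ k : Nat, start = (k : Int) := ⟨start.toNat, by omega⟩
        have hk : k ≤ s.length := by exact_mod_cast h1
        have hspec := PySem.Chars.findFrom_natCast_spec s m k hk hneg
        set i := PySem.Chars.findFrom s m (k : Int) none with hidef
        have hile : (k : Int) ≤ i := hspec.1
        have hi0 : 0 ≤ i := by omega
        have hpre : m <+: s.drop i.toNat := hspec.2.1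
        have hroom := pvMatch_room s m hm i hi0 hpre
        set c := pvAInner s m i (s.length + 1) 1 with hcdef
        have hinner := pvAInner_spec s m hm i hi0 (s.length + 1) 1 le_rfl (by push_cast; omega)
        rw [← hcdef] at hinner
        have hc1 : 1 ≤ c := hinner.1
        have hnomatch : ¬ m <+: s.drop (i + (m.length : Int) * c).toNat := hinner.2.2
        have hmatches : ∀ k' : Int, 0 ≤ k' → k' < c → m <+: s.drop (i + (m.length : Int) * k').toNat := by
          intro k' hk0 hkc
          rcases eq_or_lt_of_le hk0 with h | h
          · rw [← h, mul_zero, add_zero]; exact hpre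
          · exact hinner.2.1 k' (by omega) hkc
        have hroomc : i + (m.length : Int) * c ≤ (s.length : Int) := by
          have := pvMatch_room s m hm (i + (m.length : Int) * (c - 1)) (by nlinarith) (hmatches (c-1) (by omega) (by omega))
          nlinarith
        have hMc1 : 1 ≤ (m.length : Int) * c := by nlinarith
        have hcMc : c ≤ (m.length : Int) * c := by nlinarith
        obtain ⟨d, hd⟩ : ∃ d : Nat, c = ((d : Int) + 1) := ⟨(c - 1).toNat, by omega⟩
        have hcN : c = ((d + 1 : Nat) : Int) := by push_cast; omega
        have hfuelrun : d + 1 ≤ fG + 1 := by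
          have : ((d:Int) + 1) ≤ fG + 1 := by push_cast at h3 ⊢; omega
          omega
        -- the gather from start coincides with the gather from i
        have hfi : PySem.Chars.findFrom s m i none = i :=
          pvFind_at_match s m hm i hi0 hpre
        have hgs : pvGatherS s m (fG+1) (k : Int) = pvGatherS s m (fG+1) i := by
          simp only [pvGatherS, ← hidef, hfi, PySem.List.len_eq]
        -- decompose the gather into the run and the remainder
        have hrun := pvGatherS_run s m hm (d+1) (fG+1) i hi0 hfuelrun
          (by intro k' hk0 hkc; exact hmatches k' hk0 (by omega))
        -- A takes one step
        simp only [pvAOuter, PySem.List.len_eq, if_pos hlt, ← hidef, if_neg hneg, ← hcdef]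
        rw [hgs, hrun, List.foldl_append, ← hcN]
        -- B scans the run
        rw [pvRun_succ]
        simp only [List.foldl_cons]
        have hstep : pvBStep (m.length : Int) (best, streak, prev) i = (max best 1, 1, some i) := by
          cases prev with
          | none => simp [pvBStep]
          | some p => simp [pvBStep, h5 p rfl]
        rw [hstep, pvFold_run_chain (m.length : Int) d (max best 1) 1 i (le_max_right _ _)]
        have hstate : ((max (max best 1) (1 + (d : Int)), 1 + (d : Int), some (i + (m.length : Int) * (d : Int)))
            : Int × Int × Option Int) = (max best c, c, some (i + (m.length : Int) * (d : Int)))  := by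
          refine Prod.ext ?_ (Prod.ext ?_ rfl)
          · show max (max best 1) (1 + (d : Int)) = max best c
            omega
          · show 1 + (d : Int) = c
            omega
        rw [hstate]
        -- the remainder: no match at i + len(m)*c, so the next find cannot chain
        have hnochain : ∀ p, (some (i + (m.length : Int) * (d : Int)) : Option Int) = some p →
            PySem.Chars.findFrom s m (i + (m.length : Int) * c) none ≠ p + (m.length : Int) := by
          intro p hp heq
          obtain rfl : p = i + (m.length : Int) * (d : Int) := by injection hp with h; omega
          have harg : i + (m.length : Int) * (d : Int) + (m.length : Int) = i + (m.length : Int) * c := by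
            rw [hd]; ring
          rw [harg] at heq
          obtain ⟨j, hj⟩ : ∃ j : Nat, i + (m.length : Int) * c = (j : Int) :=
            ⟨(i + (m.length : Int) * c).toNat, by omega⟩
          rw [hj] at heq
          have hjle : j ≤ s.length := by exact_mod_cast hj ▸ hroomc
          have hne2 : PySem.Chars.findFrom s m (j : Int) none ≠ -1 := by rw [heq]; omega
          have hspec2 := PySem.Chars.findFrom_natCast_spec s m j hjle hne2
          have := hspec2.2.1
          rw [heq] at this
          apply hnomatch
          rw [hj]
          simpa using this
        exact ih (fG + 1 - (d+1)) (i + (m.length : Int) * c) (max best c) c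
          (some (i + (m.length : Int) * (d : Int))) (by omega) hroomc
          (by push_cast at h2 ⊢; omega)
          (by
            have hsub : ((fG + 1 - (d+1) : Nat) : Int) = (fG : Int) - d := by omega
            rw [hsub]
            push_cast at h3 ⊢
            omega)
          (le_max_right _ _) hnochain

-- ===== VERDICT (by name: the statement is the Claim_ definition above) =====
theorem count_max_consecutive_motifs_spec : Claim_equal_count_max_consecutive_motifs := by
  intro sequence motif _ hpre
  unfold Spec_count_max_consecutive_motifs
  unfold count_max_consecutive_motifs count_max_consecutive_motifs_alt
  have hm : motif.toList ≠ [] := by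
    intro h
    apply hpre
    have := congrArg String.ofList h
    simpa using this
  show _ = (List.foldl (pvBStep (PySem.List.len motif.toList)) (0, 0, none)
      (pvBGather sequence.toList motif.toList (sequence.toList.length + 1) 0 [])).1
  rw [pvBGather_acc, List.nil_append]
  rw [pvMain sequence.toList motif.toList hm (sequence.toList.length + 1)
      (sequence.toList.length + 1) 0 0 0 none (by omega) (by exact_mod_cast Nat.zero_le _)
      (by push_cast; omega) (by push_cast; omega) (le_refl 0) (by intro p hp; cases hp)]
  simp [PySem.List.len_eq]
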